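-- pv_equiv track=rewrite | github.com/RyanRasi/Sommelier | trainCustomModel.py | remove_overlapping_entities
-- ===== SOURCE A (Python) =====
-- def remove_overlapping_entities(entities):
--     # Sort entities by start position
--     sorted_entities = sorted(entities, key=lambda x: x[0])
--
--     # Use a list to store non-overlapping entities
--     non_overlapping_entities = []
--
--     # Iterate through the sorted entities
--     for current_entity in sorted_entities:
--         # If non_overlapping_entities is empty or the current_entity does not overlap with the last entity in the list
--         if not non_overlapping_entities or current_entity[0] >= non_overlapping_entities[-1][1]:
--             non_overlapping_entities.append(current_entity)
--         else:
--             # If the current_entity overlaps, choose the one with the larger span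
--             if current_entity[1] > non_overlapping_entities[-1][1]:
--                 non_overlapping_entities[-1] = current_entity
--
--     return non_overlapping_entities
-- ===== SOURCE B (Python) =====
-- def remove_overlapping_entities(entities):
--     # Pass 1: sort by start, partition into overlap clusters using the running max end.
--     # Pass 2: each cluster's representative is its max-end entity (first one on ties).
--     srt = sorted(entities, key=lambda x: x[0])
--     clusters = []
--     cur = []
--     max_end = 0
--     for e in srt:
--         if not cur or e[0] >= max_end:
--             if cur:
--                 clusters.append(cur)
--             cur = [e]
--             max_end = e[1]
--         else:
--             cur.append(e)
--             if e[1] > max_end: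
--                 max_end = e[1]
--     if cur:
--         clusters.append(cur)
--     return [max(c, key=lambda e: e[1]) for c in clusters]
-- ===== Notes on version B (the rewrite author's own statement) =====
-- stated objective: alternative
-- what changed: Replaces A's single greedy pass that mutates the tail of its output list with a two-pass scheme: first partition the start-sorted entities into overlap clusters via a running max-end, then map each cluster to its max-end representative (first on ties) with built-in max.
import Mathlib
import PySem

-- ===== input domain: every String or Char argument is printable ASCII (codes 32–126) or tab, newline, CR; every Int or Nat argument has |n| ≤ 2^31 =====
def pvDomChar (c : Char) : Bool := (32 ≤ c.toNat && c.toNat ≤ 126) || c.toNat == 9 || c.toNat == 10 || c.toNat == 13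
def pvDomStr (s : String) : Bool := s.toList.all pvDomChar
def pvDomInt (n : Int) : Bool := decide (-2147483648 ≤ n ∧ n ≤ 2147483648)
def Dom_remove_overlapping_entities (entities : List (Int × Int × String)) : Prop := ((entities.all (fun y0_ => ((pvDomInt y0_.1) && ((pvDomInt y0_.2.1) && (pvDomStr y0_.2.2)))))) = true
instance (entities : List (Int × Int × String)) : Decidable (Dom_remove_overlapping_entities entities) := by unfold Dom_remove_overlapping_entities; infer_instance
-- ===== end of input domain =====

-- B restructures A's greedy replace-in-place pass into cluster partitioning + per-cluster max; same cost (alternative decomposition).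

-- ===== PORT A =====
-- loop body of A's for-loop (append / replace-last / skip)
def stepA_rm (acc : List (Int × Int × String)) (cur : Int × Int × String) : List (Int × Int × String) :=
  match acc.getLast? with
  | none => acc ++ [cur]
  | some last =>
    if cur.1 ≥ last.2.1 then acc ++ [cur]
    else if cur.2.1 > last.2.1 then acc.dropLast ++ [cur]
    else acc

def remove_overlapping_entities (entities : List (Int × Int × String)) : List (Int × Int × String) :=
  let sorted_entities := PySem.List.sorted entities (fun x => x.1)
  sorted_entities.foldl stepA_rm []

-- ===== PORT B =====
-- Python's max(c, key=lambda e: e[1]); clusters are always nonempty so the getD default is never used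
def pick_rm (c : List (Int × Int × String)) : Int × Int × String :=
  (PySem.List.max? c (fun e => e.2.1)).getD (0, 0, "")

-- loop body of Source B's for-loop over state (clusters, cur, max_end)
def stepB_rm (s : List (List (Int × Int × String)) × List (Int × Int × String) × Int)
    (e : Int × Int × String) :
    List (List (Int × Int × String)) × List (Int × Int × String) × Int :=
  if s.2.1.isEmpty || e.1 ≥ s.2.2 then
    ((if s.2.1.isEmpty then s.1 else s.1 ++ [s.2.1]), [e], e.2.1)
  else
    (s.1, s.2.1 ++ [e], if e.2.1 > s.2.2 then e.2.1 else s.2.2)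

def remove_overlapping_entities_alt (entities : List (Int × Int × String)) : List (Int × Int × String) :=
  let srt := PySem.List.sorted entities (fun x => x.1)
  let st := srt.foldl stepB_rm ([], [], 0)
  let clusters := if st.2.1.isEmpty then st.1 else st.1 ++ [st.2.1]
  clusters.map pick_rm

-- ===== PRECONDITION & SPEC =====
def Spec_remove_overlapping_entities (entities : List (Int × Int × String)) (out : List (Int × Int × String)) : Prop := out = remove_overlapping_entities_alt entities
instance (entities : List (Int × Int × String)) (out : List (Int × Int × String)) : Decidable (Spec_remove_overlapping_entities entities out) := by unfold Spec_remove_overlapping_entities; infer_instance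

-- ===== CLAIM (what is proved, stated in full; the proofs are below) =====
def Claim_equal_remove_overlapping_entities : Prop := ∀ (entities : List (Int × Int × String)), Dom_remove_overlapping_entities entities → Spec_remove_overlapping_entities entities (remove_overlapping_entities entities)

-- ===== LEMMAS AND PROOFS =====

-- max? over a concat: one more step of the running-max fold
lemma max?_concat_of_some {cur : List (Int × Int × String)} {m e : Int × Int × String}
    (h : PySem.List.max? cur (fun e => e.2.1) = some m) :
    PySem.List.max? (cur ++ [e]) (fun e => e.2.1)
      = if m.2.1 < e.2.1 then some e else some m := by
  simp only [PySem.List.max?] at h ⊢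
  rw [List.foldl_append, h]
  rfl

lemma max?_cur_ne_nil {cur : List (Int × Int × String)} {m : Int × Int × String}
    (h : PySem.List.max? cur (fun e => e.2.1) = some m) : cur.isEmpty = false := by
  cases cur with
  | nil => simp [PySem.List.max?] at h
  | cons a t => rfl

-- loop invariant: A's accumulator is the picked clusters plus the current cluster's pick m,
-- and B's max_end equals m's end
lemma loop_eq (l : List (Int × Int × String)) :
    ∀ (clusters : List (List (Int × Int × String))) (cur : List (Int × Int × String))
      (m : Int × Int × String),
      PySem.List.max? cur (fun e => e.2.1) = some m →
      pick_rm cur = m →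
      List.foldl stepA_rm (clusters.map pick_rm ++ [m]) l
        = (let st := List.foldl stepB_rm (clusters, cur, m.2.1) l
           (if st.2.1.isEmpty then st.1 else st.1 ++ [st.2.1]).map pick_rm) := by
  induction l with
  | nil =>
    intro clusters cur m h hp
    simp [max?_cur_ne_nil h, hp]
  | cons e t ih =>
    intro clusters cur m h hp
    have hne := max?_cur_ne_nil h
    simp only [List.foldl_cons]
    by_cases h1 : e.1 ≥ m.2.1
    · -- new cluster
      have hA : stepA_rm (clusters.map pick_rm ++ [m]) e
          = (clusters ++ [cur]).map pick_rm ++ [e] := by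
        simp [stepA_rm, h1, hp]
      have hB : stepB_rm (clusters, cur, m.2.1) e = (clusters ++ [cur], [e], e.2.1) := by
        simp [stepB_rm, hne, h1]
      rw [hA, hB]
      exact ih (clusters ++ [cur]) [e] e rfl rfl
    · by_cases h2 : e.2.1 > m.2.1
      · -- extend cluster, e becomes the new pick
        have hA : stepA_rm (clusters.map pick_rm ++ [m]) e = clusters.map pick_rm ++ [e] := by
          simp [stepA_rm, h1, h2]
        have hB : stepB_rm (clusters, cur, m.2.1) e = (clusters, cur ++ [e], e.2.1) := by
          simp [stepB_rm, hne, h1, h2]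
        rw [hA, hB]
        have hmax : PySem.List.max? (cur ++ [e]) (fun e => e.2.1) = some e := by
          rw [max?_concat_of_some h]; simp [h2]
        exact ih clusters (cur ++ [e]) e hmax (by simp [pick_rm, hmax])
      · -- extend cluster, pick unchanged
        have hA : stepA_rm (clusters.map pick_rm ++ [m]) e = clusters.map pick_rm ++ [m] := by
          simp [stepA_rm, h1, h2]
        have hB : stepB_rm (clusters, cur, m.2.1) e = (clusters, cur ++ [e], m.2.1) := by
          simp [stepB_rm, hne, h1, h2]
        rw [hA, hB]
        have hmax : PySem.List.max? (cur ++ [e]) (fun e => e.2.1) = some m := by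
          rw [max?_concat_of_some h]; simp [h2]
        exact ih clusters (cur ++ [e]) m hmax (by simp [pick_rm, hmax])

lemma folds_eq (l : List (Int × Int × String)) :
    List.foldl stepA_rm [] l
      = (let st := List.foldl stepB_rm ([], [], 0) l
         (if st.2.1.isEmpty then st.1 else st.1 ++ [st.2.1]).map pick_rm) := by
  cases l with
  | nil => rfl
  | cons x t =>
    simp only [List.foldl_cons]
    have hA : stepA_rm [] x = ([] : List (List (Int × Int × String))).map pick_rm ++ [x] := rfl
    have hB : stepB_rm ([], [], 0) x = ([], [x], x.2.1) := rfl
    rw [hA, hB]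
    exact loop_eq t [] [x] x rfl rfl

-- ===== VERDICT (by name: the statement is the Claim_ definition above) =====
theorem remove_overlapping_entities_spec : Claim_equal_remove_overlapping_entities := by
  intro entities _
  unfold Spec_remove_overlapping_entities remove_overlapping_entities remove_overlapping_entities_alt
  exact folds_eq _
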